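-- pv_equiv track=rewrite | github.com/dVad3R/code_theory | src/question/question1/encode.py | prepareForEncode
-- ===== SOURCE A (Python) =====
-- def prepareForEncode(c,k):
--     original=len(c)
--     if(len(c)%k==0):
--         return c,len(c)
--     else:
--         while(len(c)%k!=0):
--             c.append(0)
--     return c,original
-- ===== SOURCE B (Python) =====
-- def prepareForEncode(c, k):
--     original = len(c)
--     padding = (-original) % abs(k)
--     c.extend([0] * padding)
--     return c, original
-- ===== Notes on version B (the rewrite author's own statement) =====
-- stated objective: simpler
-- what changed: Replaces the one-at-a-time while loop that re-tests len(c)%k with a closed-form padding count (-len(c))%abs(k) and a single bulk extend.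
import Mathlib
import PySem

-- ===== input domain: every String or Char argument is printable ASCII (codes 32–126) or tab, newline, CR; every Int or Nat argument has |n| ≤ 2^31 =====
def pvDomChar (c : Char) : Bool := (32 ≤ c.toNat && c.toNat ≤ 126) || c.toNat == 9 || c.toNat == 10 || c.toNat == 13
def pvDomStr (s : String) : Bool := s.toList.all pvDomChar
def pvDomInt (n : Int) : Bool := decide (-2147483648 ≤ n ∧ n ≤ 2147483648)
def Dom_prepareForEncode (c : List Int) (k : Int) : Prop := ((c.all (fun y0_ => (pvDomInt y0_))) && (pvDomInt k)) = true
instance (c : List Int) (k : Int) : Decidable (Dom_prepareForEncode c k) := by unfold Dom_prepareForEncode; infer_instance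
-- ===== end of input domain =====

-- B replaces A's append-one-at-a-time while loop by a closed-form padding count and one
-- bulk extend (objective: simpler). A mutates its argument in place; equivalence proved
-- here is about the RETURN value (B performs the same in-place extension in Python).

-- ===== PORT A =====
-- the while loop; fuel k.natAbs is enough (at most |k|-1 appends are ever needed)
def pvLoopA (fuel : Nat) (c : List Int) (k : Int) : List Int :=
  match fuel with
  | 0 => c
  | f + 1 =>
    if PySem.Int.mod (c.length : Int) k ≠ 0 then pvLoopA f (c ++ [0]) k else c

def prepareForEncode (c : List Int) (k : Int) : List Int × Int :=
  let original : Int := c.length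
  if PySem.Int.mod (c.length : Int) k = 0 then (c, (c.length : Int))
  else (pvLoopA k.natAbs c k, original)

-- ===== PORT B =====
def prepareForEncode_alt (c : List Int) (k : Int) : List Int × Int :=
  let original : Int := c.length
  let padding : Int := PySem.Int.mod (-original) (k.natAbs : Int)
  (c ++ List.replicate padding.toNat 0, original)

-- ===== PRECONDITION & SPEC =====
-- k = 0 is excluded: Python A raises ZeroDivisionError there (and so does B).
def Pre_prepareForEncode (c : List Int) (k : Int) : Prop := k ≠ 0
instance (c : List Int) (k : Int) : Decidable (Pre_prepareForEncode c k) := by unfold Pre_prepareForEncode; infer_instance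
def pvWitness_prepareForEncode : List Int × Int := ([1, 2, 3], 2)

def Spec_prepareForEncode (c : List Int) (k : Int) (out : List Int × Int) : Prop := out = prepareForEncode_alt c k
instance (c : List Int) (k : Int) (out : List Int × Int) : Decidable (Spec_prepareForEncode c k out) := by unfold Spec_prepareForEncode; infer_instance

-- ===== CLAIM (what is proved, stated in full; the proofs are below) =====
def Claim_equal_prepareForEncode : Prop := ∀ (c : List Int) (k : Int), Dom_prepareForEncode c k → Pre_prepareForEncode c k → Spec_prepareForEncode c k (prepareForEncode c k)

-- ===== LEMMAS AND PROOFS =====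

theorem cond_iff (k n : Int) :
    PySem.Int.mod n k = 0 ↔ (-n) % (k.natAbs : Int) = 0 := by
  rw [PySem.Int.mod_eq_zero_iff_dvd]
  constructor
  · intro h
    exact Int.emod_eq_zero_of_dvd ((Int.natAbs_dvd.mpr h).neg_right)
  · intro h
    have := (Int.dvd_of_emod_eq_zero h)
    have : (k.natAbs : Int) ∣ n := (dvd_neg.mp this)
    exact Int.natAbs_dvd.mp this

theorem emod_pred (m a : Int) (hm : 0 < m) (h : 0 < a % m) :
    (a - 1) % m = a % m - 1 := by
  have h1 := Int.ediv_add_emod a m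
  have h2 := Int.emod_lt_of_pos a hm
  calc (a - 1) % m = (a % m - 1 + m * (a / m)) % m := by congr 1; linarith
    _ = (a % m - 1) % m := by rw [Int.add_mul_emod_self_left]
    _ = a % m - 1 := Int.emod_eq_of_lt (by omega) (by omega)

theorem pvLoopA_eq (k : Int) (hk : k ≠ 0) :
    ∀ (fuel : Nat) (c : List Int),
      ((-(c.length : Int)) % (k.natAbs : Int)).toNat ≤ fuel →
      pvLoopA fuel c k = c ++ List.replicate ((-(c.length : Int)) % (k.natAbs : Int)).toNat 0 := by
  have hm : (0:Int) < (k.natAbs : Int) := by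
    have := Int.natAbs_pos.mpr hk; exact_mod_cast this
  intro fuel
  induction fuel with
  | zero =>
    intro c hb
    rw [Nat.le_zero] at hb
    simp only [pvLoopA]
    rw [hb, List.replicate_zero, List.append_nil]
  | succ f ih =>
    intro c hb
    by_cases h : PySem.Int.mod (c.length : Int) k = 0
    · have h0 : (-(c.length : Int)) % (k.natAbs : Int) = 0 := (cond_iff k _).mp h
      simp only [pvLoopA, h, ne_eq, not_true_eq_false, if_false]
      rw [h0]
      simp
    · have h0 : (-(c.length : Int)) % (k.natAbs : Int) ≠ 0 := fun h' => h ((cond_iff k _).mpr h')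
      have hpos : 0 < (-(c.length : Int)) % (k.natAbs : Int) := by
        have := Int.emod_nonneg (-(c.length : Int)) (by omega : (k.natAbs : Int) ≠ 0)
        omega
      have hstep : (-(((c ++ [0]).length : Nat) : Int)) % (k.natAbs : Int)
          = (-(c.length : Int)) % (k.natAbs : Int) - 1 := by
        have : (-(((c ++ [0]).length : Nat) : Int)) = (-(c.length : Int)) - 1 := by
          simp; ring
        rw [this, emod_pred _ _ hm hpos]
      have hb' : ((-(((c ++ [0]).length : Nat) : Int)) % (k.natAbs : Int)).toNat ≤ f := by
        rw [hstep]; omega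
      have hrec := ih (c ++ [0]) hb'
      rw [hstep] at hrec
      simp only [pvLoopA, if_pos h, hrec]
      have hp : ((-(c.length : Int)) % (k.natAbs : Int)).toNat
          = (((-(c.length : Int)) % (k.natAbs : Int)) - 1).toNat + 1 := by omega
      rw [hp, List.append_assoc]
      simp [List.replicate_succ]

theorem prepareForEncode_spec : Claim_equal_prepareForEncode := by
  intro c k _ hk
  have hm : (0:Int) < (k.natAbs : Int) := by
    have := Int.natAbs_pos.mpr hk; exact_mod_cast this
  show (if PySem.Int.mod (c.length : Int) k = 0 then ((c, (c.length : Int)) : List Int × Int)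
        else (pvLoopA k.natAbs c k, (c.length : Int)))
      = (c ++ List.replicate (PySem.Int.mod (-(c.length : Int)) (k.natAbs : Int)).toNat 0, (c.length : Int))
  rw [PySem.Int.mod_eq_emod_of_pos hm]
  by_cases h : PySem.Int.mod (c.length : Int) k = 0
  · have h0 : (-(c.length : Int)) % (k.natAbs : Int) = 0 := (cond_iff k _).mp h
    rw [if_pos h, h0]
    simp
  · have hb : ((-(c.length : Int)) % (k.natAbs : Int)).toNat ≤ k.natAbs := by
      have h2 := Int.emod_lt_of_pos (-(c.length : Int)) hm
      omega
    rw [if_neg h, pvLoopA_eq k hk k.natAbs c hb]
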